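-- pv_equiv track=rewrite | github.com/tilaboy/work_note | algorithms/leetcode_weekly/aug_08_08/5839_Remove_Stones_to_Minimize_the_Total.py | minStoneSum_priority_queue
-- ===== SOURCE A (Python) =====
-- from queue import PriorityQueue
--
-- def minStoneSum_priority_queue(piles, k):
--     my_queue = PriorityQueue()
--     for ele in piles:
--         my_queue.put((-ele, ele))
--     for i in range(k):
--         target = my_queue.get()[0] // 2
--         my_queue.put((target, - target))
--
--     summ = 0
--     while not my_queue.empty():
--         _, v = my_queue.get()
--         summ += v
--     return summ
-- ===== SOURCE B (Python) =====
-- def minStoneSum_priority_queue(piles, k):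
--     # Sort once descending, then merge the sorted piles with a FIFO of halved
--     # values by two front pointers (halved values come out non-increasing, so
--     # the FIFO stays sorted); stop early once the maximum is <= 1, since
--     # removing floor(m/2) stones from such a pile changes nothing.
--     xs = sorted(piles, reverse=True)
--     halved = []
--     i = hi = 0
--     rem = k
--     while rem > 0:
--         if i < len(xs) and (hi >= len(halved) or xs[i] >= halved[hi]):
--             m = xs[i]
--             from_xs = True
--         elif hi < len(halved):
--             m = halved[hi]
--             from_xs = False
--         else:
--             break
--         if m <= 1:
--             break
--         if from_xs:
--             i += 1
--         else:
--             hi += 1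
--         halved.append(m - m // 2)
--         rem -= 1
--     return sum(xs[i:]) + sum(halved[hi:])
-- ===== Notes on version B (the rewrite author's own statement) =====
-- stated objective: faster
-- what changed: Replaces the priority queue of negated pairs with: sort once descending, then merge the sorted piles with a FIFO of halved values via two front pointers (halved values come out in non-increasing order), stopping early once the maximum is <= 1, a fixed point of halving; Pre_ only excludes (empty piles, k >= 1), where A blocks forever in PriorityQueue.get().
-- intended difference: On nonempty piles that are all negative with k >= 1 (outside the problem's stated domain 1 <= piles[i]), A's negation trick keeps 'halving' the largest pile upward toward zero so the returned total grows, while B treats any maximum <= 1 as a fixed point and returns the plain sum; leaving nonsensical negative piles untouched is the intended behaviour of B's early stop, an equally valid choice on this unspecified corner. — e.g. on minStoneSum_priority_queue([-4], 1): A returns -2, B returns -4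
import Mathlib
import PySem

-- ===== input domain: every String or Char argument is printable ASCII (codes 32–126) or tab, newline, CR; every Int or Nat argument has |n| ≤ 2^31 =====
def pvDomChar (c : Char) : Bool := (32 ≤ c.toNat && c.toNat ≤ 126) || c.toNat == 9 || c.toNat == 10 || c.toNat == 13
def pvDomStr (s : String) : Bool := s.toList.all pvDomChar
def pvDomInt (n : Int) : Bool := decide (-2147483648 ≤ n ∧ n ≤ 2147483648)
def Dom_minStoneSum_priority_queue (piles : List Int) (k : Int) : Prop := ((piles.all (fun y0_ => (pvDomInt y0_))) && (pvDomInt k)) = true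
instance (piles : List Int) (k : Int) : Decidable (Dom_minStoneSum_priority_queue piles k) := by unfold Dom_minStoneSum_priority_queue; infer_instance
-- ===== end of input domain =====

-- B sorts once, then merges the sorted piles with a FIFO of halved values by two
-- front pointers, stopping early at the halving fixed points (max <= 1):
-- a heap-free, early-stopping re-implementation (objective: faster).
-- Return values only: neither program mutates its arguments.

-- ===== PORT A =====
-- The PriorityQueue is ported as an ascending ordered list of (priority, value)
-- pairs: put = ordered insert, get = pop the head (heap ties cannot matter:
-- entries with equal first component are identical pairs here).
def pqInsert (p : Int × Int) : List (Int × Int) → List (Int × Int)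
  | [] => [p]
  | q :: t => if p.1 < q.1 ∨ (p.1 = q.1 ∧ p.2 ≤ q.2) then p :: q :: t else q :: pqInsert p t

-- one iteration of A's `for i in range(k)` body; on an empty queue Python's
-- get() blocks forever (excluded by Pre_; the [] branch is a dummy for totality).
def aStep (q : List (Int × Int)) : List (Int × Int) :=
  match q with
  | [] => []
  | p :: t => pqInsert (PySem.Int.floordiv p.1 2, -(PySem.Int.floordiv p.1 2)) t

-- `for i in range(k)`: k iterations of the loop body, ported as fuel recursion
-- on range(k)'s length (= k.toNat); the index i is unused by the body.
def aRun : Nat → List (Int × Int) → List (Int × Int)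
  | 0, q => q
  | n + 1, q => aRun n (aStep q)

def minStoneSum_priority_queue (piles : List Int) (k : Int) : Int :=
  let q0 := piles.foldl (fun q e => pqInsert (-e, e) q) []
  let q1 := aRun k.toNat q0
  q1.foldl (fun s p => s + p.2) 0

-- ===== PORT B =====
-- the main `while rem > 0` loop of Source B (fuel = rem; i, hi are the two front pointers)
def bLoop (xs : List Int) : Nat → Nat → Nat → List Int → Int
  | 0, i, hi, halved => (xs.drop i).sum + (halved.drop hi).sum
  | r + 1, i, hi, halved =>
    if i < xs.length ∧ (halved.length ≤ hi ∨ halved.getD hi 0 ≤ xs.getD i 0) then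
      let m := xs.getD i 0
      if m ≤ 1 then (xs.drop i).sum + (halved.drop hi).sum
      else bLoop xs r (i + 1) hi (halved ++ [m - PySem.Int.floordiv m 2])
    else if hi < halved.length then
      let m := halved.getD hi 0
      if m ≤ 1 then (xs.drop i).sum + (halved.drop hi).sum
      else bLoop xs r i (hi + 1) (halved ++ [m - PySem.Int.floordiv m 2])
    else (xs.drop i).sum + (halved.drop hi).sum

def minStoneSum_priority_queue_alt (piles : List Int) (k : Int) : Int :=
  bLoop (PySem.List.sorted piles (fun x => x) true) k.toNat 0 0 []

-- ===== PRECONDITION & SPEC =====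
-- Pre_ excludes only (piles = [], k ≥ 1): there Python A blocks forever in
-- my_queue.get() (queue.PriorityQueue.get with block=True) and returns nothing.
def Pre_minStoneSum_priority_queue (piles : List Int) (k : Int) : Prop := piles ≠ [] ∨ k ≤ 0
instance (piles : List Int) (k : Int) : Decidable (Pre_minStoneSum_priority_queue piles k) := by unfold Pre_minStoneSum_priority_queue; infer_instance
def pvWitness_minStoneSum_priority_queue : List Int × Int := ([5, 4, 9], 2)

-- On nonempty all-negative piles with k ≥ 1 (outside the problem's stated
-- domain 1 ≤ piles[i]) A keeps 'halving' the largest pile upward toward zero so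
-- the total grows, while B treats a maximum ≤ 1 as a fixed point and returns
-- the plain sum — the intended behaviour of its early stop on this unspecified corner.
def D_minStoneSum_priority_queue (piles : List Int) (k : Int) : Prop :=
  piles ≠ [] ∧ 1 ≤ k ∧ ∀ x ∈ piles, x < 0
instance (piles : List Int) (k : Int) : Decidable (D_minStoneSum_priority_queue piles k) := by unfold D_minStoneSum_priority_queue; infer_instance

def Spec_minStoneSum_priority_queue (piles : List Int) (k : Int) (out : Int) : Prop := ¬ D_minStoneSum_priority_queue piles k → out = minStoneSum_priority_queue_alt piles k
instance (piles : List Int) (k : Int) (out : Int) : Decidable (Spec_minStoneSum_priority_queue piles k out) := by unfold Spec_minStoneSum_priority_queue; infer_instance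

def pvDiffWitness_minStoneSum_priority_queue : List Int × Int := ([-4], 1)
def pvDiffWitnessOut_minStoneSum_priority_queue : Int × Int := (-2, -4)

-- ===== CLAIM (what is proved, stated in full; the proofs are below) =====
def Claim_unchanged_minStoneSum_priority_queue : Prop := ∀ (piles : List Int) (k : Int), Dom_minStoneSum_priority_queue piles k → Pre_minStoneSum_priority_queue piles k → Spec_minStoneSum_priority_queue piles k (minStoneSum_priority_queue piles k)
def Claim_changed_minStoneSum_priority_queue : Prop := Dom_minStoneSum_priority_queue (pvDiffWitness_minStoneSum_priority_queue.1) (pvDiffWitness_minStoneSum_priority_queue.2) ∧ Pre_minStoneSum_priority_queue (pvDiffWitness_minStoneSum_priority_queue.1) (pvDiffWitness_minStoneSum_priority_queue.2) ∧ D_minStoneSum_priority_queue (pvDiffWitness_minStoneSum_priority_queue.1) (pvDiffWitness_minStoneSum_priority_queue.2) ∧ minStoneSum_priority_queue (pvDiffWitness_minStoneSum_priority_queue.1) (pvDiffWitness_minStoneSum_priority_queue.2) = pvDiffWitnessOut_minStoneSum_priority_queue.1 ∧ minStoneSum_priority_queue_alt (pvDiffWitness_minStoneSum_priority_queue.1)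 (pvDiffWitness_minStoneSum_priority_queue.2) = pvDiffWitnessOut_minStoneSum_priority_queue.2 ∧ pvDiffWitnessOut_minStoneSum_priority_queue.1 ≠ pvDiffWitnessOut_minStoneSum_priority_queue.2
def Claim_exact_minStoneSum_priority_queue : Prop := ∀ (piles : List Int) (k : Int), Dom_minStoneSum_priority_queue piles k → Pre_minStoneSum_priority_queue piles k → D_minStoneSum_priority_queue piles k → minStoneSum_priority_queue piles k ≠ minStoneSum_priority_queue_alt piles k

-- ===== LEMMAS AND PROOFS =====

-- Abstract model: the multiset of pile values kept as THE descending sorted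
-- list; one operation replaces the head (the maximum) by ceil(head/2).
def hf (v : Int) : Int := v - PySem.Int.floordiv v 2   -- = ceil(v/2)

def insD (v : Int) : List Int → List Int
  | [] => [v]
  | h :: t => if h ≤ v then v :: h :: t else h :: insD v t

def stepM : List Int → List Int
  | [] => []
  | v :: t => insD (hf v) t

def runM : Nat → List Int → List Int
  | 0, l => l
  | r + 1, l => runM r (stepM l)

def mergeD : List Int → List Int → List Int
  | [], ys => ys
  | x :: xt, [] => x :: xt
  | x :: xt, y :: yt => if y ≤ x then x :: mergeD xt (y :: yt) else y :: mergeD (x :: xt) yt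

-- repeated ceil-halving of the running maximum while it stays negative (fuel = r);
-- used only to characterise A's result on all-negative piles in the tightness proof.
def halveNegChain : Nat → Int → Int
  | 0, v => v
  | r + 1, v => if v < 0 then halveNegChain r (-(PySem.Int.floordiv (-v) 2)) else v

-- ---- arithmetic about hf / floordiv ----
theorem fd_facts (v : Int) : 2 * PySem.Int.floordiv v 2 + PySem.Int.mod v 2 = v ∧ (PySem.Int.mod v 2 = 0 ∨ PySem.Int.mod v 2 = 1) := by
  have h1 := PySem.Int.floordiv_mul_add_mod v 2
  have h2 := PySem.Int.mod_two_eq v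
  constructor
  · omega
  · exact h2

theorem fd_neg (v : Int) : PySem.Int.floordiv (-v) 2 = PySem.Int.floordiv v 2 - v := by
  have h1 := fd_facts v
  have h2 := fd_facts (-v)
  omega

theorem hf_mono {v w : Int} (h : v ≤ w) : hf v ≤ hf w := by
  have h1 := fd_facts v
  have h2 := fd_facts w
  unfold hf; omega
theorem hf_le_self {v : Int} (h : 0 ≤ v) : hf v ≤ v := by
  have h1 := fd_facts v; unfold hf; omega
theorem hf_ge_self {v : Int} (h : v ≤ 0) : v ≤ hf v := by
  have h1 := fd_facts v; unfold hf; omega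
theorem hf_nonpos {v : Int} (h : v ≤ 0) : hf v ≤ 0 := by
  have h1 := fd_facts v; unfold hf; omega
theorem hf_one_le {v : Int} (h : 2 ≤ v) : 1 ≤ hf v := by
  have h1 := fd_facts v; unfold hf; omega
theorem hf_fix {v : Int} (h0 : 0 ≤ v) (h1 : v ≤ 1) : hf v = v := by
  have h2 := fd_facts v; unfold hf; omega
theorem hf_gt_self {v : Int} (h : v < 0) : v < hf v := by
  have h1 := fd_facts v; unfold hf; omega

-- ---- insD / mergeD structure ----
theorem insD_perm (v : Int) (l : List Int) : (insD v l).Perm (v :: l) := by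
  induction l with
  | nil => simp [insD]
  | cons h t ih =>
    by_cases hc : h ≤ v
    · simp [insD, hc]
    · simp only [insD, if_neg hc]
      exact (ih.cons h).trans (List.Perm.swap v h t)
theorem mem_insD {y v : Int} {l : List Int} : y ∈ insD v l ↔ y = v ∨ y ∈ l := by
  constructor
  · intro h
    have := (insD_perm v l).mem_iff.mp h
    simpa using this
  · intro h
    apply (insD_perm v l).mem_iff.mpr
    simpa using h
theorem insD_pairwise {v : Int} {l : List Int} (h : l.Pairwise (· ≥ ·)) : (insD v l).Pairwise (· ≥ ·) := by
  induction l with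
  | nil => simp [insD]
  | cons a t ih =>
    rcases List.pairwise_cons.mp h with ⟨ha, ht⟩
    by_cases hc : a ≤ v
    · simp only [insD, if_pos hc]
      refine List.pairwise_cons.mpr ⟨?_, h⟩
      intro b hb
      rcases List.mem_cons.mp hb with rfl | hb
      · exact hc
      · exact le_trans (ha b hb) hc
    · simp only [insD, if_neg hc]
      refine List.pairwise_cons.mpr ⟨?_, ih ht⟩
      intro b hb
      rcases mem_insD.mp hb with rfl | hb
      · exact le_of_not_ge hc
      · exact ha b hb
theorem mergeD_nil (X : List Int) : mergeD X [] = X := by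
  cases X <;> simp [mergeD]

theorem mergeD_nil_left (H : List Int) : mergeD [] H = H := by
  simp [mergeD]

theorem mergeD_cons_cons (x y : Int) (xt yt : List Int) :
    mergeD (x :: xt) (y :: yt)
      = if y ≤ x then x :: mergeD xt (y :: yt) else y :: mergeD (x :: xt) yt := by
  simp only [mergeD]
theorem mergeD_perm (X H : List Int) : (mergeD X H).Perm (X ++ H) := by
  fun_induction mergeD X H with
  | case1 ys => simp
  | case2 x xt => simp
  | case3 x xt y yt hc ih => simpa using ih.cons x
  | case4 x xt y yt hc ih =>
    refine (ih.cons y).trans ?_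
    have : (y :: ((x :: xt) ++ yt)).Perm ((x :: xt) ++ (y :: yt)) := by
      simpa using (List.perm_middle (a := y) (l₁ := x :: xt) (l₂ := yt)).symm
    exact this
theorem mem_mergeD {z : Int} {X H : List Int} : z ∈ mergeD X H ↔ z ∈ X ∨ z ∈ H := by
  rw [(mergeD_perm X H).mem_iff]; simp

theorem mergeD_pairwise {X H : List Int} (hX : X.Pairwise (· ≥ ·)) (hH : H.Pairwise (· ≥ ·)) : (mergeD X H).Pairwise (· ≥ ·) := by
  fun_induction mergeD X H with
  | case1 ys => exact hH
  | case2 x xt => exact hX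
  | case3 x xt y yt hc ih =>
    rcases List.pairwise_cons.mp hX with ⟨hx, hxt⟩
    refine List.pairwise_cons.mpr ⟨?_, ih hxt hH⟩
    intro b hb
    rcases mem_mergeD.mp hb with hb | hb
    · exact hx b hb
    · rcases List.mem_cons.mp hb with rfl | hb
      · exact hc
      · exact le_trans ((List.pairwise_cons.mp hH).1 b hb) hc
  | case4 x xt y yt hc ih =>
    rcases List.pairwise_cons.mp hH with ⟨hy, hyt⟩
    refine List.pairwise_cons.mpr ⟨?_, ih hX hyt⟩
    intro b hb
    have hxy : x ≤ y := le_of_not_ge hc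
    rcases mem_mergeD.mp hb with hb | hb
    · rcases List.mem_cons.mp hb with rfl | hb
      · exact hxy
      · exact le_trans ((List.pairwise_cons.mp hX).1 b hb) hxy
    · exact hy b hb
theorem sortedDesc_unique {l1 l2 : List Int} (hp : l1.Perm l2) (h1 : l1.Pairwise (· ≥ ·)) (h2 : l2.Pairwise (· ≥ ·)) : l1 = l2 := by
  exact hp.eq_of_pairwise (fun a b _ _ hab hba => le_antisymm hba hab) h1 h2

theorem runM_nil (r : Nat) : runM r [] = [] := by
  induction r with
  | zero => rfl
  | succ n ih => simpa [runM, stepM] using ih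
theorem runM_fix {m : Int} {t : List Int} (hpw : (m :: t).Pairwise (· ≥ ·)) (h0 : 0 ≤ m) (h1 : m ≤ 1) (r : Nat) : runM r (m :: t) = m :: t := by
  induction r with
  | zero => rfl
  | succ n ih =>
    have hstep : stepM (m :: t) = m :: t := by
      simp only [stepM, hf_fix h0 h1]
      cases t with
      | nil => rfl
      | cons a t' =>
        have ha : a ≤ m := (List.pairwise_cons.mp hpw).1 a (by simp)
        simp [insD, ha]
    simpa [runM, hstep] using ih

-- ---- A-side characterisation ----
theorem pqInsert_pair (v : Int) (l : List Int) :
    pqInsert (-v, v) (l.map (fun w => (-w, w))) = (insD v l).map (fun w => (-w, w)) := by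
  induction l with
  | nil => rfl
  | cons h t ih =>
    simp only [List.map_cons, pqInsert, insD]
    split_ifs with h1 h2 h2
    · rfl
    · omega
    · omega
    · simp only [List.map_cons]; rw [ih]

theorem build_pair (piles : List Int) : ∀ l : List Int,
    piles.foldl (fun q e => pqInsert (-e, e) q) (l.map (fun w => (-w, w)))
      = (piles.foldl (fun acc e => insD e acc) l).map (fun w => (-w, w)) := by
  induction piles with
  | nil => intro l; rfl
  | cons e ps ih =>
    intro l
    simp only [List.foldl_cons]
    rw [pqInsert_pair e l, ih (insD e l)]

theorem aStep_pair (l : List Int) : aStep (l.map (fun w => (-w, w))) = (stepM l).map (fun w => (-w, w)) := by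
  cases l with
  | nil => rfl
  | cons v t =>
    simp only [List.map_cons, aStep, stepM]
    have h1 : PySem.Int.floordiv (-v) 2 = -(hf v) := by
      have := fd_neg v; unfold hf; omega
    rw [h1, neg_neg]
    exact pqInsert_pair (hf v) t

theorem aRun_pair (n : Nat) : ∀ l : List Int,
    aRun n (l.map (fun w => (-w, w))) = (runM n l).map (fun w => (-w, w)) := by
  induction n with
  | zero => intro l; rfl
  | succ m ih =>
    intro l
    simp only [aRun]
    rw [aStep_pair l, ih (stepM l)]
    rfl

theorem sum_pair (l : List Int) : (l.map (fun w => (-w, w))).foldl (fun s p => s + p.2) 0 = l.sum := by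
  suffices h : ∀ (l : List Int) (a : Int),
      (l.map (fun w => (-w, w))).foldl (fun s p => s + p.2) a = a + l.sum by
    simpa using h l 0
  intro l
  induction l with
  | nil => intro a; simp
  | cons x t ih =>
    intro a
    simp only [List.map_cons, List.foldl_cons, List.sum_cons, ih]
    ring

theorem isort_perm (piles : List Int) : ∀ l : List Int,
    (piles.foldl (fun acc e => insD e acc) l).Perm (piles ++ l) := by
  induction piles with
  | nil => intro l; simp
  | cons e ps ih =>
    intro l
    simp only [List.foldl_cons]
    refine (ih (insD e l)).trans ?_
    refine (List.Perm.append_left ps (insD_perm e l)).trans ?_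
    simp only [List.cons_append]
    simpa using (List.perm_middle (a := e) (l₁ := ps) (l₂ := l)).symm

theorem isort_pairwise (piles : List Int) : ∀ l : List Int, l.Pairwise (· ≥ ·) →
    (piles.foldl (fun acc e => insD e acc) l).Pairwise (· ≥ ·) := by
  induction piles with
  | nil => intro l h; exact h
  | cons e ps ih =>
    intro l h
    exact ih (insD e l) (insD_pairwise h)

theorem isort_eq_sorted (piles : List Int) :
    piles.foldl (fun acc e => insD e acc) [] = PySem.List.sorted piles (fun x => x) true := by
  apply sortedDesc_unique
  · refine ((isort_perm piles []).trans ?_).trans (PySem.List.sorted_perm piles (fun x => x) true).symm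
    simp
  · exact isort_pairwise piles [] (by simp)
  · exact PySem.List.sorted_pairwise_rev piles (fun x => x)

theorem A_char (piles : List Int) (k : Int) :
    minStoneSum_priority_queue piles k = (runM k.toNat (PySem.List.sorted piles (fun x => x) true)).sum := by
  have h0 := build_pair piles []
  simp only [List.map_nil] at h0
  show (aRun k.toNat
      (piles.foldl (fun q e => pqInsert (-e, e) q) [])).foldl (fun s p => s + p.2) 0 = _
  rw [h0, aRun_pair, sum_pair, isort_eq_sorted]

-- ---- B-side characterisation ----
theorem mergeMax {X H : List Int} {m : Int} {rest : List Int}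
    (hXpw : X.Pairwise (· ≥ ·)) (hHpw : H.Pairwise (· ≥ ·))
    (hmerge : mergeD X H = m :: rest) :
    ∀ z ∈ X ++ H, z ≤ m := by
  have hpw := mergeD_pairwise hXpw hHpw
  rw [hmerge] at hpw
  intro z hz
  have hz' : z ∈ m :: rest := by
    rw [← hmerge]
    exact (mergeD_perm X H).mem_iff.mpr hz
  rcases List.mem_cons.mp hz' with rfl | hz'
  · exact le_refl z
  · exact (List.pairwise_cons.mp hpw).1 z hz'

theorem runFix_sum {X H : List Int} {m : Int} {rest : List Int}
    (hXpw : X.Pairwise (· ≥ ·)) (hHpw : H.Pairwise (· ≥ ·))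
    (hmerge : mergeD X H = m :: rest)
    (hnn : X ++ H = [] ∨ ∃ y ∈ X ++ H, 0 ≤ y)
    (hm1 : m ≤ 1) (r : Nat) :
    (runM r (mergeD X H)).sum = X.sum + H.sum := by
  have hpw := mergeD_pairwise hXpw hHpw
  rw [hmerge] at hpw
  have hmax := mergeMax hXpw hHpw hmerge
  have h0m : 0 ≤ m := by
    rcases hnn with he | ⟨y, hy, hy0⟩
    · exfalso
      have : mergeD X H = [] := ((mergeD_perm X H).trans (he ▸ List.Perm.refl [])).eq_nil
      rw [hmerge] at this
      simp at this
    · exact le_trans hy0 (hmax y hy)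
  rw [hmerge, runM_fix hpw h0m hm1, ← hmerge, (mergeD_perm X H).sum_eq, List.sum_append]

theorem bLoop_eq (xs : List Int) (hxs : xs.Pairwise (· ≥ ·)) : ∀ (r : Nat), ∀ (i hi : Nat) (halved : List Int),
    hi ≤ halved.length →
    (halved.drop hi).Pairwise (· ≥ ·) →
    ((xs.drop i) ++ (halved.drop hi) = [] ∨ ∃ y ∈ (xs.drop i) ++ (halved.drop hi), 0 ≤ y) →
    (∀ y ∈ halved.drop hi, ∀ z ∈ (xs.drop i) ++ (halved.drop hi), hf z ≤ y) →
    bLoop xs r i hi halved = (runM r (mergeD (xs.drop i) (halved.drop hi))).sum := by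
  intro r
  induction r with
  | zero =>
    intro i hi halved _ _ _ _
    simp only [bLoop, runM]
    rw [(mergeD_perm _ _).sum_eq, List.sum_append]
  | succ n ih =>
    intro i hi halved hhi hH hnn hd
    have pwX : (xs.drop i).Pairwise (· ≥ ·) := hxs.sublist (List.drop_sublist i xs)
    have pwX' : (xs.drop (i + 1)).Pairwise (· ≥ ·) := hxs.sublist (List.drop_sublist (i + 1) xs)
    by_cases c1 : i < xs.length ∧ (halved.length ≤ hi ∨ halved.getD hi 0 ≤ xs.getD i 0)
    · obtain ⟨hilen, hcase⟩ := c1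
      have hXc : xs.drop i = xs.getD i 0 :: xs.drop (i + 1) := by
        rw [List.getD_eq_getElem xs 0 hilen]; exact List.drop_eq_getElem_cons hilen
      have hmerge : mergeD (xs.drop i) (halved.drop hi)
          = xs.getD i 0 :: mergeD (xs.drop (i + 1)) (halved.drop hi) := by
        cases hHd : halved.drop hi with
        | nil => rw [mergeD_nil, mergeD_nil, hXc]
        | cons h t =>
          have hhilen : hi < halved.length := by
            by_contra hc
            rw [List.drop_eq_nil_iff.mpr (by omega)] at hHd
            simp at hHd
          have hh : h = halved.getD hi 0 := by
            have h2 := List.drop_eq_getElem_cons hhilen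
            rw [hHd] at h2
            rw [List.getD_eq_getElem halved 0 hhilen]
            exact (List.cons.injEq h t _ _ ▸ h2).1
          have hle : h ≤ xs.getD i 0 := by
            rcases hcase with hc | hc
            · omega
            · omega
          rw [hXc, mergeD_cons_cons, if_pos hle]
      by_cases hm1 : xs.getD i 0 ≤ 1
      · have hbl : bLoop xs (n + 1) i hi halved = (xs.drop i).sum + (halved.drop hi).sum := by
          simp only [bLoop, if_pos (And.intro hilen hcase)]
          rw [if_pos hm1]
        rw [hbl]
        exact (runFix_sum pwX hH hmerge hnn hm1 (n + 1)).symm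
      · have h2m : 2 ≤ xs.getD i 0 := by omega
        have hbl : bLoop xs (n + 1) i hi halved
            = bLoop xs n (i + 1) hi (halved ++ [xs.getD i 0 - PySem.Int.floordiv (xs.getD i 0) 2]) := by
          simp only [bLoop, if_pos (And.intro hilen hcase)]
          rw [if_neg hm1]
        have hmax : ∀ z ∈ xs.drop i ++ halved.drop hi, z ≤ xs.getD i 0 :=
          mergeMax pwX hH hmerge
        have hdropH : (halved ++ [hf (xs.getD i 0)]).drop hi = halved.drop hi ++ [hf (xs.getD i 0)] :=
          List.drop_append_of_le_length hhi
        have hmemm : xs.getD i 0 ∈ xs.drop i ++ halved.drop hi := by rw [hXc]; simp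
        have hfm0 : (0 : Int) ≤ hf (xs.getD i 0) := le_trans (by norm_num) (hf_one_le h2m)
        have pwH' : (halved.drop hi ++ [hf (xs.getD i 0)]).Pairwise (· ≥ ·) := by
          rw [List.pairwise_append]
          refine ⟨hH, by simp, ?_⟩
          intro a ha b hb
          rcases List.mem_singleton.mp hb with rfl
          exact hd a ha (xs.getD i 0) hmemm
        have hnn' : (xs.drop (i + 1) ++ (halved.drop hi ++ [hf (xs.getD i 0)]) = [] ∨
            ∃ y ∈ xs.drop (i + 1) ++ (halved.drop hi ++ [hf (xs.getD i 0)]), 0 ≤ y) := by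
          right
          exact ⟨hf (xs.getD i 0), by simp, hfm0⟩
        have hd' : ∀ y ∈ halved.drop hi ++ [hf (xs.getD i 0)],
            ∀ z ∈ xs.drop (i + 1) ++ (halved.drop hi ++ [hf (xs.getD i 0)]), hf z ≤ y := by
          intro y hy z hz
          have hzold : z ∈ xs.drop i ++ halved.drop hi ∨ z = hf (xs.getD i 0) := by
            rcases List.mem_append.mp hz with hz | hz
            · exact Or.inl (List.mem_append.mpr (Or.inl (by rw [hXc]; exact List.mem_cons_of_mem _ hz)))
            · rcases List.mem_append.mp hz with hz | hz
              · exact Or.inl (List.mem_append.mpr (Or.inr hz))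
              · exact Or.inr (List.mem_singleton.mp hz)
          rcases List.mem_append.mp hy with hy | hy
          · rcases hzold with hz' | rfl
            · exact hd y hy z hz'
            · exact le_trans (hf_le_self hfm0) (hd y hy (xs.getD i 0) hmemm)
          · rcases List.mem_singleton.mp hy with rfl
            rcases hzold with hz' | rfl
            · exact hf_mono (hmax z hz')
            · exact hf_le_self hfm0
        have hih := ih (i + 1) hi (halved ++ [hf (xs.getD i 0)])
          (by simp; omega) (hdropH ▸ pwH') (hdropH ▸ hnn') (hdropH ▸ hd')
        rw [hdropH] at hih
        have hins : insD (hf (xs.getD i 0)) (mergeD (xs.drop (i + 1)) (halved.drop hi))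
            = mergeD (xs.drop (i + 1)) (halved.drop hi ++ [hf (xs.getD i 0)]) := by
          apply sortedDesc_unique
          · refine ((insD_perm _ _).trans ?_).trans (mergeD_perm _ _).symm
            refine ((mergeD_perm _ _).cons _).trans ?_
            rw [← List.append_assoc]
            exact (List.perm_append_singleton _ _).symm
          · exact insD_pairwise (mergeD_pairwise pwX' hH)
          · exact mergeD_pairwise pwX' pwH'
        show bLoop xs (n + 1) i hi halved = (runM n (stepM (mergeD (xs.drop i) (halved.drop hi)))).sum
        rw [hbl, hmerge]
        show _ = (runM n (insD (hf (xs.getD i 0)) (mergeD (xs.drop (i + 1)) (halved.drop hi)))).sum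
        rw [hins, ← hih]
        rfl
    · by_cases c2 : hi < halved.length
      · have hHc : halved.drop hi = halved.getD hi 0 :: halved.drop (hi + 1) := by
          rw [List.getD_eq_getElem halved 0 c2]; exact List.drop_eq_getElem_cons c2
        have pwH0 : (halved.drop (hi + 1)).Pairwise (· ≥ ·) := by
          rw [hHc] at hH; exact (List.pairwise_cons.mp hH).2
        have hmerge : mergeD (xs.drop i) (halved.drop hi)
            = halved.getD hi 0 :: mergeD (xs.drop i) (halved.drop (hi + 1)) := by
          rcases Decidable.em (i < xs.length) with hi' | hi'
          · have hXc : xs.drop i = xs.getD i 0 :: xs.drop (i + 1) := by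
              rw [List.getD_eq_getElem xs 0 hi']; exact List.drop_eq_getElem_cons hi'
            have hlt : xs.getD i 0 < halved.getD hi 0 := by
              rcases not_and_or.mp c1 with hc | hc
              · omega
              · rcases not_or.mp hc with ⟨_, hc2⟩; omega
            rw [hXc, hHc, mergeD_cons_cons,
              if_neg (show ¬ halved.getD hi 0 ≤ xs.getD i 0 by omega)]
          · rw [List.drop_eq_nil_iff.mpr (by omega), hHc, mergeD_nil_left, mergeD_nil_left]
        by_cases hm1 : halved.getD hi 0 ≤ 1
        · have hbl : bLoop xs (n + 1) i hi halved = (xs.drop i).sum + (halved.drop hi).sum := by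
            simp only [bLoop, if_neg c1, if_pos c2]
            rw [if_pos hm1]
          rw [hbl]
          exact (runFix_sum pwX hH hmerge hnn hm1 (n + 1)).symm
        · have h2m : 2 ≤ halved.getD hi 0 := by omega
          have hbl : bLoop xs (n + 1) i hi halved
              = bLoop xs n i (hi + 1) (halved ++ [halved.getD hi 0 - PySem.Int.floordiv (halved.getD hi 0) 2]) := by
            simp only [bLoop, if_neg c1, if_pos c2]
            rw [if_neg hm1]
          have hmax : ∀ z ∈ xs.drop i ++ halved.drop hi, z ≤ halved.getD hi 0 :=
            mergeMax pwX hH hmerge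
          have hdropH : (halved ++ [hf (halved.getD hi 0)]).drop (hi + 1)
              = halved.drop (hi + 1) ++ [hf (halved.getD hi 0)] :=
            List.drop_append_of_le_length (by omega)
          have hmemm : halved.getD hi 0 ∈ xs.drop i ++ halved.drop hi := by rw [hHc]; simp
          have hfm0 : (0 : Int) ≤ hf (halved.getD hi 0) := le_trans (by norm_num) (hf_one_le h2m)
          have pwH' : (halved.drop (hi + 1) ++ [hf (halved.getD hi 0)]).Pairwise (· ≥ ·) := by
            rw [List.pairwise_append]
            refine ⟨pwH0, by simp, ?_⟩
            intro a ha b hb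
            rcases List.mem_singleton.mp hb with rfl
            exact hd a (by rw [hHc]; exact List.mem_cons_of_mem _ ha) (halved.getD hi 0) hmemm
          have hnn' : (xs.drop i ++ (halved.drop (hi + 1) ++ [hf (halved.getD hi 0)]) = [] ∨
              ∃ y ∈ xs.drop i ++ (halved.drop (hi + 1) ++ [hf (halved.getD hi 0)]), 0 ≤ y) := by
            right
            exact ⟨hf (halved.getD hi 0), by simp, hfm0⟩
          have hd' : ∀ y ∈ halved.drop (hi + 1) ++ [hf (halved.getD hi 0)],
              ∀ z ∈ xs.drop i ++ (halved.drop (hi + 1) ++ [hf (halved.getD hi 0)]), hf z ≤ y := by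
            intro y hy z hz
            have hzold : z ∈ xs.drop i ++ halved.drop hi ∨ z = hf (halved.getD hi 0) := by
              rcases List.mem_append.mp hz with hz | hz
              · exact Or.inl (List.mem_append.mpr (Or.inl hz))
              · rcases List.mem_append.mp hz with hz | hz
                · exact Or.inl (List.mem_append.mpr (Or.inr (by rw [hHc]; exact List.mem_cons_of_mem _ hz)))
                · exact Or.inr (List.mem_singleton.mp hz)
            have hyold : y ∈ halved.drop hi ∨ y = hf (halved.getD hi 0) := by
              rcases List.mem_append.mp hy with hy | hy
              · exact Or.inl (by rw [hHc]; exact List.mem_cons_of_mem _ hy)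
              · exact Or.inr (List.mem_singleton.mp hy)
            rcases hyold with hy' | rfl
            · rcases hzold with hz' | rfl
              · exact hd y hy' z hz'
              · exact le_trans (hf_le_self hfm0) (hd y hy' (halved.getD hi 0) hmemm)
            · rcases hzold with hz' | rfl
              · exact hf_mono (hmax z hz')
              · exact hf_le_self hfm0
          have hih := ih i (hi + 1) (halved ++ [hf (halved.getD hi 0)])
            (by simp; omega) (hdropH ▸ pwH') (hdropH ▸ hnn') (hdropH ▸ hd')
          rw [hdropH] at hih
          have hins : insD (hf (halved.getD hi 0)) (mergeD (xs.drop i) (halved.drop (hi + 1)))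
              = mergeD (xs.drop i) (halved.drop (hi + 1) ++ [hf (halved.getD hi 0)]) := by
            apply sortedDesc_unique
            · refine ((insD_perm _ _).trans ?_).trans (mergeD_perm _ _).symm
              refine ((mergeD_perm _ _).cons _).trans ?_
              rw [← List.append_assoc]
              exact (List.perm_append_singleton _ _).symm
            · exact insD_pairwise (mergeD_pairwise pwX pwH0)
            · exact mergeD_pairwise pwX pwH'
          show bLoop xs (n + 1) i hi halved = (runM n (stepM (mergeD (xs.drop i) (halved.drop hi)))).sum
          rw [hbl, hmerge]
          show _ = (runM n (insD (hf (halved.getD hi 0)) (mergeD (xs.drop i) (halved.drop (hi + 1))))).sum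
          rw [hins, ← hih]
          rfl
      · have hHnil : halved.drop hi = [] := List.drop_eq_nil_iff.mpr (by omega)
        have hXnil : xs.drop i = [] := by
          rcases not_and_or.mp c1 with hc | hc
          · exact List.drop_eq_nil_iff.mpr (by omega)
          · exact absurd (by omega) hc
        have hbl : bLoop xs (n + 1) i hi halved = (xs.drop i).sum + (halved.drop hi).sum := by
          simp only [bLoop, if_neg c1, if_neg c2]
        rw [hbl, hXnil, hHnil]
        simp [mergeD, runM_nil]

theorem bLoop_zero (xs : List Int) : bLoop xs 0 0 0 [] = xs.sum := by
  simp [bLoop]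

theorem B_char (piles : List Int) (k : Int) (h : ∃ y ∈ piles, 0 ≤ y) :
    minStoneSum_priority_queue_alt piles k
      = (runM k.toNat (PySem.List.sorted piles (fun x => x) true)).sum := by
  have hpw := PySem.List.sorted_pairwise_rev piles (fun x => x)
  obtain ⟨y, hy, hy0⟩ := h
  have hy' : y ∈ PySem.List.sorted piles (fun x => x) true :=
    (PySem.List.sorted_perm piles (fun x => x) true).mem_iff.mpr hy
  have hb := bLoop_eq (PySem.List.sorted piles (fun x => x) true) hpw k.toNat 0 0 []
    (by simp) (by simp) (Or.inr ⟨y, by simpa using hy', hy0⟩) (by simp)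
  simp only [List.drop_zero, mergeD_nil] at hb
  simpa [minStoneSum_priority_queue_alt] using hb

-- ---- lemmas for the difference region ----
theorem runM_negChain (r : Nat) : ∀ (v : Int) (t : List Int), (∀ y ∈ t, y ≤ v) → v ≤ 0 →
    runM r (v :: t) = halveNegChain r v :: t := by
  induction r with
  | zero => intro v t _ _; rfl
  | succ n ih =>
    intro v t hts hv0
    have hins : insD (hf v) t = hf v :: t := by
      cases t with
      | nil => rfl
      | cons a t' =>
        have ha : a ≤ hf v := le_trans (hts a (by simp)) (hf_ge_self hv0)
        simp [insD, ha]
    have hrun : runM (n + 1) (v :: t) = runM n (hf v :: t) := by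
      simp only [runM, stepM, hins]
    by_cases hv : v < 0
    · have h1 : -(PySem.Int.floordiv (-v) 2) = hf v := by
        have := fd_neg v; unfold hf; omega
      have hchain : halveNegChain (n + 1) v = halveNegChain n (hf v) := by
        rw [show halveNegChain (n + 1) v
            = if v < 0 then halveNegChain n (-(PySem.Int.floordiv (-v) 2)) else v from rfl,
          if_pos hv, h1]
      rw [hrun, hchain]
      exact ih (hf v) t (fun y hy => le_trans (hts y hy) (hf_ge_self hv0)) (hf_nonpos hv0)
    · have hv0' : v = 0 := le_antisymm hv0 (not_lt.mp hv)
      subst hv0'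
      have hf0 : hf (0 : Int) = 0 := hf_fix (by norm_num) (by norm_num)
      have hc0 : halveNegChain (n + 1) (0 : Int) = 0 := by
        rw [show halveNegChain (n + 1) (0 : Int)
            = if (0 : Int) < 0 then halveNegChain n (-(PySem.Int.floordiv (-(0 : Int)) 2)) else 0 from rfl]
        simp
      rw [hrun, hf0, ih 0 t hts le_rfl, hc0]
      have : halveNegChain n (0 : Int) = 0 := by
        cases n with
        | zero => rfl
        | succ m =>
          rw [show halveNegChain (m + 1) (0 : Int)
              = if (0 : Int) < 0 then halveNegChain m (-(PySem.Int.floordiv (-(0 : Int)) 2)) else 0 from rfl]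
          simp
      rw [this]

theorem halveNegChain_ge (r : Nat) : ∀ v : Int, v ≤ halveNegChain r v := by
  induction r with
  | zero => intro v; exact le_refl v
  | succ n ih =>
    intro v
    by_cases hv : v < 0
    · rw [show halveNegChain (n + 1) v
          = if v < 0 then halveNegChain n (-(PySem.Int.floordiv (-v) 2)) else v from rfl, if_pos hv]
      have h1 : -(PySem.Int.floordiv (-v) 2) = hf v := by
        have := fd_neg v; unfold hf; omega
      calc v ≤ hf v := hf_ge_self (le_of_lt hv)
        _ ≤ halveNegChain n (-(PySem.Int.floordiv (-v) 2)) := by rw [h1]; exact ih (hf v)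
    · rw [show halveNegChain (n + 1) v
          = if v < 0 then halveNegChain n (-(PySem.Int.floordiv (-v) 2)) else v from rfl, if_neg hv]

theorem halveNegChain_gt {v : Int} (hv : v < 0) (n : Nat) : v < halveNegChain (n + 1) v := by
  rw [show halveNegChain (n + 1) v
      = if v < 0 then halveNegChain n (-(PySem.Int.floordiv (-v) 2)) else v from rfl, if_pos hv]
  have h1 : -(PySem.Int.floordiv (-v) 2) = hf v := by
    have := fd_neg v; unfold hf; omega
  calc v < hf v := hf_gt_self hv
    _ ≤ halveNegChain n (-(PySem.Int.floordiv (-v) 2)) := by rw [h1]; exact halveNegChain_ge n (hf v)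

theorem bLoop_neg_head {x : Int} (rest : List Int) (hx : x ≤ 1) (n : Nat) :
    bLoop (x :: rest) (n + 1) 0 0 [] = x + rest.sum := by
  have hc1 : (0 < (x :: rest).length ∧ (([] : List Int).length ≤ 0 ∨ ([] : List Int).getD 0 0 ≤ (x :: rest).getD 0 0)) := by
    simp
  simp only [bLoop, if_pos hc1]
  simp [hx]

-- ===== VERDICT (by name: the statement is the Claim_ definition above) =====
theorem minStoneSum_priority_queue_spec : Claim_unchanged_minStoneSum_priority_queue := by
  intro piles k _ hpre
  unfold Spec_minStoneSum_priority_queue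
  intro hnd
  by_cases hk : k ≤ 0
  · have hk0 : k.toNat = 0 := Int.toNat_of_nonpos hk
    rw [A_char, minStoneSum_priority_queue_alt, hk0, bLoop_zero]
    rfl
  · have hk1 : 1 ≤ k := by omega
    have hne : piles ≠ [] := by
      rcases hpre with h | h
      · exact h
      · omega
    have hex : ∃ y ∈ piles, 0 ≤ y := by
      unfold D_minStoneSum_priority_queue at hnd
      push Not at hnd
      obtain ⟨y, hy, hy0⟩ := hnd hne hk1
      exact ⟨y, hy, by omega⟩
    rw [A_char, B_char piles k hex]

theorem minStoneSum_priority_queue_changed : Claim_changed_minStoneSum_priority_queue := by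
  unfold Claim_changed_minStoneSum_priority_queue; decide

theorem minStoneSum_priority_queue_tight : Claim_exact_minStoneSum_priority_queue := by
  intro piles k _ _ hd
  obtain ⟨hne, hk1, hneg⟩ := hd
  have hpw := PySem.List.sorted_pairwise_rev piles (fun x => x)
  have hperm := PySem.List.sorted_perm piles (fun x => x) true
  cases hS : PySem.List.sorted piles (fun x => x) true with
  | nil =>
    exfalso
    have : piles = [] := (hperm.symm.trans (hS ▸ List.Perm.refl _)).eq_nil
    exact hne this
  | cons x rest =>
    rw [hS] at hpw hperm
    have hx : x < 0 := hneg x (hperm.mem_iff.mp (by simp))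
    obtain ⟨n, hn⟩ : ∃ n : Nat, k.toNat = n + 1 := ⟨k.toNat - 1, by omega⟩
    have hA : minStoneSum_priority_queue piles k = halveNegChain k.toNat x + rest.sum := by
      rw [A_char, hS, runM_negChain k.toNat x rest
        (fun y hy => (List.pairwise_cons.mp hpw).1 y hy) (le_of_lt hx)]
      simp
    have hB : minStoneSum_priority_queue_alt piles k = x + rest.sum := by
      rw [minStoneSum_priority_queue_alt, hS, hn, bLoop_neg_head rest (by omega) n]
    rw [hA, hB, hn]
    have := halveNegChain_gt hx n
    omega
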